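-- pv_equiv track=rewrite | github.com/Bharath-kolekar/cogone | quarantine/ai_orchestration_refactor_20251009/ai_orchestration_validators.py | _check_classes_third
-- ===== SOURCE A (Python) =====
-- def _check_classes_third(code: str) -> bool:
--     """Check if classes come after functions"""
--     lines = code.split('\n')
--     function_lines = []
--     class_lines = []
--
--     for i, line in enumerate(lines):
--         if line.strip().startswith('def '):
--             function_lines.append(i)
--         elif line.strip().startswith('class '):
--             class_lines.append(i)
--
--     if not function_lines or not class_lines:
--         return True
--
--     return max(function_lines) < min(class_lines)
-- ===== SOURCE B (Python) =====
-- def _check_classes_third(code: str) -> bool: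
--     """Check if classes come after functions"""
--     seen_class = False
--     for line in code.split('\n'):
--         stripped = line.strip()
--         if stripped.startswith('def '):
--             if seen_class:
--                 return False
--         elif stripped.startswith('class '):
--             seen_class = True
--     return True
-- ===== Notes on version B (the rewrite author's own statement) =====
-- stated objective: simpler
-- what changed: Replaces the two collected index lists plus the max/min comparison with a single boolean seen_class flag and an early return on the first def line that follows a class line.
import Mathlib
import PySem

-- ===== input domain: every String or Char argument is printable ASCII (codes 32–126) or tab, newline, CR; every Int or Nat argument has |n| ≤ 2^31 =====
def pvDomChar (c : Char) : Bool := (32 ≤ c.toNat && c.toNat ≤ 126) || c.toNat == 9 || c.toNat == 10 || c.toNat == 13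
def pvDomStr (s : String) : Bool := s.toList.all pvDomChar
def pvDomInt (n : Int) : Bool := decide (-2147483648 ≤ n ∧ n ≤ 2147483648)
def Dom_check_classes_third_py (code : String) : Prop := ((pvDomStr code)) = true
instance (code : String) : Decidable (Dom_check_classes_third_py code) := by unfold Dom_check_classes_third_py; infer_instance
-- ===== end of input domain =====

-- B replaces A's two index lists + max/min comparison by one boolean flag with an early return (objective: simpler).

-- ===== PORT A =====
-- the enumerate loop collecting the indices of def-lines and class-lines
def pvACollect : List (List Char) → Nat → List Nat → List Nat → List Nat × List Nat
  | [], _, fs, cs => (fs, cs)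
  | l :: ls, i, fs, cs =>
    if PySem.Chars.startswith (PySem.Chars.strip l) "def ".toList then
      pvACollect ls (i + 1) (fs ++ [i]) cs
    else if PySem.Chars.startswith (PySem.Chars.strip l) "class ".toList then
      pvACollect ls (i + 1) fs (cs ++ [i])
    else
      pvACollect ls (i + 1) fs cs

-- 'if not function_lines or not class_lines: return True; return max(...) < min(...)'
def pvAFinish : List Nat × List Nat → Bool
  | (fs, cs) =>
    if fs = [] ∨ cs = [] then true
    else
      match PySem.List.max? fs (fun x => x), PySem.List.min? cs (fun x => x) with
      | some mf, some mc => decide (mf < mc)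
      | _, _ => true   -- unreachable: both lists nonempty here

def check_classes_third_py (code : String) : Bool :=
  pvAFinish (pvACollect (PySem.Chars.splitOn code.toList "\n".toList) 0 [] [])

-- ===== PORT B =====
def pvBLoop : List (List Char) → Bool → Bool
  | [], _ => true
  | l :: ls, seen =>
    let s := PySem.Chars.strip l
    if PySem.Chars.startswith s "def ".toList then
      (if seen then false else pvBLoop ls seen)
    else if PySem.Chars.startswith s "class ".toList then
      pvBLoop ls true
    else
      pvBLoop ls seen

def check_classes_third_py_alt (code : String) : Bool :=
  pvBLoop (PySem.Chars.splitOn code.toList "\n".toList) false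

-- ===== PRECONDITION & SPEC =====
def Spec_check_classes_third_py (code : String) (out : Bool) : Prop := out = check_classes_third_py_alt code
instance (code : String) (out : Bool) : Decidable (Spec_check_classes_third_py code out) := by unfold Spec_check_classes_third_py; infer_instance

-- ===== CLAIM (what is proved, stated in full; the proofs are below) =====
def Claim_equal_check_classes_third_py : Prop := ∀ (code : String), Dom_check_classes_third_py code → Spec_check_classes_third_py code (check_classes_third_py code)

-- ===== LEMMAS AND PROOFS =====

lemma pv_foldl_max_lt {t : List Nat} {x i : Nat} (hx : x < i) (ht : ∀ y ∈ t, y < i) :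
    t.foldl max x < i := by
  induction t generalizing x with
  | nil => simpa using hx
  | cons a t ih =>
    simp only [List.foldl_cons]
    exact ih (by simp [hx, ht a (by simp)]) (fun y hy => ht y (by simp [hy]))

lemma pv_foldl_min_le {t : List Nat} {x : Nat} : t.foldl min x ≤ x := by
  induction t generalizing x with
  | nil => simp
  | cons a t ih => exact le_trans ih (Nat.min_le_left _ _)

lemma pv_max_append {fs : List Nat} {i : Nat} (h : ∀ x ∈ fs, x < i) :
    PySem.List.max? (fs ++ [i]) (fun x => x) = some i := by
  cases fs with
  | nil => simp [PySem.List.max?_id_cons]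
  | cons x t =>
    rw [List.cons_append, PySem.List.max?_id_cons, List.foldl_append]
    have : t.foldl max x < i :=
      pv_foldl_max_lt (h x (by simp)) (fun y hy => h y (by simp [hy]))
    simp [Nat.max_eq_right (le_of_lt this)]

-- A's partial result already fails once a def index arrives after some class index
lemma pv_finish_def_after_class {fs cs : List Nat} {i : Nat}
    (hc : ∀ x ∈ cs, x < i) (hf : ∀ x ∈ fs, x < i) (hcs : cs ≠ []) :
    pvAFinish (fs ++ [i], cs) = false := by
  cases cs with
  | nil => exact absurd rfl hcs
  | cons c t =>
    have hmax := pv_max_append (i := i) hf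
    have hmin : t.foldl min c < i :=
      lt_of_le_of_lt pv_foldl_min_le (hc c (by simp))
    simp [pvAFinish, hmax, PySem.List.min?_id_cons, Nat.not_lt.mpr (le_of_lt hmin)]

lemma pv_finish_class_append {fs cs : List Nat} {i : Nat}
    (hf : ∀ x ∈ fs, x < i) (hc : ∀ x ∈ cs, x < i) :
    pvAFinish (fs, cs ++ [i]) = pvAFinish (fs, cs) := by
  cases cs with
  | nil =>
    cases fs with
    | nil => simp [pvAFinish]
    | cons x t =>
      have : t.foldl max x < i :=
        pv_foldl_max_lt (hf x (by simp)) (fun y hy => hf y (by simp [hy]))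
      simp [pvAFinish, PySem.List.max?_id_cons, PySem.List.min?_id_cons, this]
  | cons c t =>
    have h1 : (t ++ [i]).foldl min c = t.foldl min c := by
      rw [List.foldl_append]
      exact Nat.min_eq_left (le_of_lt (lt_of_le_of_lt pv_foldl_min_le (hc c (by simp))))
    simp [pvAFinish, PySem.List.min?_id_cons, h1]

lemma pv_key (ls : List (List Char)) : ∀ (i : Nat) (fs cs : List Nat),
    (∀ x ∈ fs, x < i) → (∀ x ∈ cs, x < i) →
    pvAFinish (pvACollect ls i fs cs) = (pvAFinish (fs, cs) && pvBLoop ls (!cs.isEmpty)) := by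
  induction ls with
  | nil => intro i fs cs _ _; simp [pvACollect, pvBLoop]
  | cons l ls ih =>
    intro i fs cs hf hc
    simp only [pvACollect, pvBLoop]
    by_cases hd : PySem.Chars.startswith (PySem.Chars.strip l) "def ".toList = true
    · rw [if_pos hd, if_pos hd]
      cases cs with
      | nil =>
        rw [ih (i + 1) (fs ++ [i]) []
          (by intro x hx; rcases List.mem_append.mp hx with h | h
              · exact lt_trans (hf x h) (Nat.lt_succ_self i)
              · simp at h; omega)
          (by simp)]
        cases fs with
        | nil => simp [pvAFinish]
        | cons x t => simp [pvAFinish]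
      | cons c t =>
        rw [ih (i + 1) (fs ++ [i]) (c :: t)
          (by intro x hx; rcases List.mem_append.mp hx with h | h
              · exact lt_trans (hf x h) (Nat.lt_succ_self i)
              · simp at h; omega)
          (fun x hx => lt_trans (hc x hx) (Nat.lt_succ_self i))]
        rw [pv_finish_def_after_class hc hf (by simp)]
        simp
    · rw [if_neg hd, if_neg hd]
      by_cases hcl : PySem.Chars.startswith (PySem.Chars.strip l) "class ".toList = true
      · rw [if_pos hcl, if_pos hcl]
        rw [ih (i + 1) fs (cs ++ [i])
          (fun x hx => lt_trans (hf x hx) (Nat.lt_succ_self i))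
          (by intro x hx; rcases List.mem_append.mp hx with h | h
              · exact lt_trans (hc x h) (Nat.lt_succ_self i)
              · simp at h; omega)]
        rw [pv_finish_class_append hf hc]
        have hne : (cs ++ [i]).isEmpty = false := by cases cs <;> rfl
        simp [hne]
      · rw [if_neg hcl, if_neg hcl]
        exact ih (i + 1) fs cs
          (fun x hx => lt_trans (hf x hx) (Nat.lt_succ_self i))
          (fun x hx => lt_trans (hc x hx) (Nat.lt_succ_self i))

-- ===== VERDICT (by name: the statement is the Claim_ definition above) =====
theorem check_classes_third_py_spec : Claim_equal_check_classes_third_py := by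
  intro code _
  unfold Spec_check_classes_third_py check_classes_third_py check_classes_third_py_alt
  rw [pv_key _ 0 [] [] (by simp) (by simp)]
  simp [pvAFinish]
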